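-- pv_equiv track=rewrite | github.com/ryanflavor/hive | src/hive/tmux.py | _decode_output_payload
-- ===== SOURCE A (Python) =====
-- _OCTAL_DIGITS = frozenset("01234567")
--
-- def _decode_output_payload(raw: str) -> str:
--     """Decode tmux control-mode escape: control bytes and '\\' are encoded as \\NNN (3 octal digits)."""
--     if "\\" not in raw:
--         return raw
--     out: list[str] = []
--     i = 0
--     n = len(raw)
--     while i < n:
--         ch = raw[i]
--         if ch == "\\" and i + 3 < n and all(c in _OCTAL_DIGITS for c in raw[i + 1 : i + 4]):
--             out.append(chr(int(raw[i + 1 : i + 4], 8)))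
--             i += 4
--         else:
--             out.append(ch)
--             i += 1
--     return "".join(out)
-- ===== SOURCE B (Python) =====
-- _OCTAL_DIGITS = frozenset("01234567")
--
-- def _decode_output_payload(raw: str) -> str:
--     """Decode tmux control-mode escapes by splitting on backslashes: each piece after a
--     backslash starting with exactly three octal digits is a decoded byte, otherwise the
--     backslash was literal."""
--     parts = raw.split("\\")
--     out = [parts[0]]
--     for p in parts[1:]:
--         if len(p) >= 3 and p[0] in _OCTAL_DIGITS and p[1] in _OCTAL_DIGITS and p[2] in _OCTAL_DIGITS:
--             out.append(chr(int(p[:3], 8)) + p[3:])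
--         else:
--             out.append("\\" + p)
--     return "".join(out)
-- ===== Notes on version B (the rewrite author's own statement) =====
-- stated objective: alternative
-- what changed: Replaces A's manual index-stepping while-loop (advance by 4 on an escape, by 1 otherwise) with a split on backslash followed by decoding each resulting piece whose first three characters are octal digits.
import Mathlib
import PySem

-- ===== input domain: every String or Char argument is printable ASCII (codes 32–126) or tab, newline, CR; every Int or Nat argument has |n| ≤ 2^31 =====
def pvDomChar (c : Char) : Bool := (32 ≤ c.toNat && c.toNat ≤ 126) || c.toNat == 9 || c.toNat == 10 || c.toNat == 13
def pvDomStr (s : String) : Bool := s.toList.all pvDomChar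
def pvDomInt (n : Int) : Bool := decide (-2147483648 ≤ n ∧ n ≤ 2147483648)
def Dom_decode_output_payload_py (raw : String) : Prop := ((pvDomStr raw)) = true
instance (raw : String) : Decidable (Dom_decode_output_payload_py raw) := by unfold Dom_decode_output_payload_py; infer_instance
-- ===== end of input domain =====

-- B replaces A's manual index-stepping scan by split-on-backslash + decode-each-piece (alternative decomposition, same cost).

-- shared helpers: membership in _OCTAL_DIGITS and chr(int(<3 octal digits>, 8))
def pvIsOct (c : Char) : Bool := c ∈ ['0','1','2','3','4','5','6','7']
def pvChr3 (a b c : Char) : Char :=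
  Char.ofNat ((a.toNat - 48) * 64 + (b.toNat - 48) * 8 + (c.toNat - 48))

-- ===== PORT A =====
-- A's while loop over index i, as the obvious recursion on the remaining characters:
-- the escape branch needs i+3 < n, i.e. three more characters after the backslash.
def pvDecAuxA : List Char → List Char
  | [] => []
  | '\\' :: a :: b :: c :: rest =>
      if pvIsOct a && pvIsOct b && pvIsOct c
      then pvChr3 a b c :: pvDecAuxA rest
      else '\\' :: pvDecAuxA (a :: b :: c :: rest)
  | ch :: rest => ch :: pvDecAuxA rest

def decode_output_payload_py (raw : String) : String :=
  if '\\' ∈ raw.toList then String.ofList (pvDecAuxA raw.toList) else raw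

-- ===== PORT B =====
-- hand port of raw.split("\\") (exact for a one-character separator): returns
-- (parts[0], parts[1:]) — the head piece, then the pieces that each followed a backslash.
def pvSplitBS : List Char → List Char × List (List Char)
  | [] => ([], [])
  | '\\' :: rest => ([], (pvSplitBS rest).1 :: (pvSplitBS rest).2)
  | c :: rest => (c :: (pvSplitBS rest).1, (pvSplitBS rest).2)

-- the loop body: decode a piece that followed a backslash
def pvDecPart : List Char → List Char
  | a :: b :: c :: rest =>
      if pvIsOct a && pvIsOct b && pvIsOct c
      then pvChr3 a b c :: rest
      else '\\' :: a :: b :: c :: rest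
  | p => '\\' :: p

def decode_output_payload_py_alt (raw : String) : String :=
  String.ofList ((pvSplitBS raw.toList).1 ++ ((pvSplitBS raw.toList).2.map pvDecPart).flatten)

-- ===== PRECONDITION & SPEC =====
def Spec_decode_output_payload_py (raw : String) (out : String) : Prop := out = decode_output_payload_py_alt raw
instance (raw : String) (out : String) : Decidable (Spec_decode_output_payload_py raw out) := by unfold Spec_decode_output_payload_py; infer_instance

-- ===== CLAIM (what is proved, stated in full; the proofs are below) =====
def Claim_equal_decode_output_payload_py : Prop := ∀ (raw : String), Dom_decode_output_payload_py raw → Spec_decode_output_payload_py raw (decode_output_payload_py raw)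

-- ===== LEMMAS AND PROOFS =====

theorem pvIsOct_ne_bs {c : Char} (h : pvIsOct c = true) : c ≠ '\\' := by
  simp [pvIsOct] at h
  rcases h with h|h|h|h|h|h|h|h <;> subst h <;> decide

theorem splitBS_bs (rest : List Char) :
    pvSplitBS ('\\' :: rest) = ([], (pvSplitBS rest).1 :: (pvSplitBS rest).2) := rfl

theorem splitBS_cons {c : Char} (h : c ≠ '\\') (rest : List Char) :
    pvSplitBS (c :: rest) = (c :: (pvSplitBS rest).1, (pvSplitBS rest).2) := by
  rw [pvSplitBS.eq_def]
  split
  · simp_all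
  · simp_all
  · simp_all

theorem splitBS_fst_len : ∀ cs : List Char, (pvSplitBS cs).1.length ≤ cs.length := by
  intro cs
  induction cs with
  | nil => simp [pvSplitBS]
  | cons c rest ih =>
      by_cases h : c = '\\'
      · subst h; rw [splitBS_bs]; simp
      · rw [splitBS_cons h]; simp; omega

theorem decPart_short {q : List Char} (h : q.length < 3) : pvDecPart q = '\\' :: q := by
  match q with
  | [] => rfl
  | [_] => rfl
  | [_, _] => rfl
  | _ :: _ :: _ :: _ => simp at h; omega

-- B's result expressed on the character list
def pvDecB (cs : List Char) : List Char :=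
  (pvSplitBS cs).1 ++ ((pvSplitBS cs).2.map pvDecPart).flatten

theorem decB_bs (rest : List Char) :
    pvDecB ('\\' :: rest) = pvDecPart (pvSplitBS rest).1 ++ ((pvSplitBS rest).2.map pvDecPart).flatten := by
  simp [pvDecB, splitBS_bs]

theorem decPart_split_not_oct {a b c : Char} {rest : List Char}
    (h : ¬ (pvIsOct a && pvIsOct b && pvIsOct c) = true) :
    pvDecPart (pvSplitBS (a :: b :: c :: rest)).1 = '\\' :: (pvSplitBS (a :: b :: c :: rest)).1 := by
  by_cases ha : a = '\\'
  · subst ha; rw [splitBS_bs]; rfl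
  · rw [splitBS_cons ha]
    by_cases hb : b = '\\'
    · subst hb; rw [splitBS_bs]; rfl
    · rw [splitBS_cons hb]
      by_cases hc : c = '\\'
      · subst hc; rw [splitBS_bs]; rfl
      · rw [splitBS_cons hc]
        simp only [pvDecPart]
        rw [if_neg h]

theorem pvDecAuxA_eq_pvDecB : ∀ cs : List Char, pvDecAuxA cs = pvDecB cs := by
  intro cs
  induction cs using pvDecAuxA.induct with
  | case1 => simp [pvDecAuxA, pvDecB, pvSplitBS]
  | case2 a b c rest hoct ih =>
      have h3 : pvIsOct a = true ∧ pvIsOct b = true ∧ pvIsOct c = true := by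
        simpa [Bool.and_eq_true, and_assoc] using hoct
      have ha := pvIsOct_ne_bs h3.1
      have hb := pvIsOct_ne_bs h3.2.1
      have hc := pvIsOct_ne_bs h3.2.2
      rw [show pvDecAuxA ('\\' :: a :: b :: c :: rest) = pvChr3 a b c :: pvDecAuxA rest by
            simp [pvDecAuxA, hoct]]
      rw [decB_bs, splitBS_cons ha, splitBS_cons hb, splitBS_cons hc]
      simp only [pvDecPart]
      rw [if_pos hoct, ih]
      simp [pvDecB]
  | case3 a b c rest hoct ih =>
      rw [show pvDecAuxA ('\\' :: a :: b :: c :: rest) = '\\' :: pvDecAuxA (a :: b :: c :: rest) by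
            simp [pvDecAuxA, hoct]]
      rw [decB_bs, decPart_split_not_oct hoct, ih]
      simp [pvDecB]
  | case4 ch rest hne ih =>
      by_cases hch : ch = '\\'
      · subst hch
        have hlen : rest.length < 3 := by
          rcases rest with _ | ⟨x, _ | ⟨y, _ | ⟨z, t⟩⟩⟩ <;> simp
          exact absurd (hne x y z t rfl rfl) id
        have hA : pvDecAuxA ('\\' :: rest) = '\\' :: pvDecAuxA rest := by
          rcases rest with _ | ⟨x, _ | ⟨y, _ | ⟨z, t⟩⟩⟩
          · rfl
          · rfl
          · rfl
          · exact absurd (hne x y z t rfl rfl) id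
        rw [hA, decB_bs, decPart_short (lt_of_le_of_lt (splitBS_fst_len rest) hlen), ih]
        simp [pvDecB]
      · have hA : pvDecAuxA (ch :: rest) = ch :: pvDecAuxA rest := by
          rcases rest with _ | ⟨x, _ | ⟨y, _ | ⟨z, t⟩⟩⟩
          · simp [pvDecAuxA]
          · simp [pvDecAuxA]
          · simp [pvDecAuxA]
          · simp [pvDecAuxA]
        rw [hA, ih]
        simp [pvDecB, splitBS_cons hch]

theorem decB_no_bs {cs : List Char} (h : '\\' ∉ cs) : pvDecB cs = cs := by
  induction cs with
  | nil => simp [pvDecB, pvSplitBS]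
  | cons c rest ih =>
      simp only [List.mem_cons, not_or] at h
      have := ih h.2
      simp only [pvDecB, splitBS_cons (Ne.symm h.1)] at *
      simpa using this

-- ===== VERDICT (by name: the statement is the Claim_ definition above) =====
theorem decode_output_payload_py_spec : Claim_equal_decode_output_payload_py := by
  intro raw _
  unfold Spec_decode_output_payload_py decode_output_payload_py decode_output_payload_py_alt
  by_cases h : '\\' ∈ raw.toList
  · rw [if_pos h, pvDecAuxA_eq_pvDecB]
    rfl
  · rw [if_neg h]
    have : (pvSplitBS raw.toList).1 ++ ((pvSplitBS raw.toList).2.map pvDecPart).flatten = raw.toList :=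
      decB_no_bs h
    rw [this]
    exact String.ofList_toList.symm
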